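-- pv_equiv track=rewrite | github.com/chj3748/TIL | Algorithm/baekjoon/bj_13022.py | wolf_cnt
-- ===== SOURCE A (Python) =====
-- def wolf_cnt(s):
--     w_cnt = 0
--     o_cnt = 0
--     l_cnt = 0
--     f_cnt = 0
--     l_s = len(s)
--     for alpha in s:
--         if alpha == 'w':
--             w_cnt += 1
--             if w_cnt > l_s // 4:
--                 return False
--         elif alpha == 'o':
--             o_cnt += 1
--             if o_cnt > l_s // 4:
--                 return False
--         elif alpha == 'l':
--             l_cnt += 1
--             if l_cnt > l_s // 4:
--                 return False
--         elif alpha == 'f':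
--             f_cnt += 1
--             if f_cnt > l_s // 4:
--                 return False
--     return True
-- ===== SOURCE B (Python) =====
-- def wolf_cnt(s):
--     return all(s.count(c) <= len(s) // 4 for c in 'wolf')
-- ===== Notes on version B (the rewrite author's own statement) =====
-- stated objective: idiomatic
-- what changed: Replaces the single fused loop with four counters and early exits by four independent s.count scans compared against len(s)//4 via all(); valid because counts only grow, so an early exit fires iff a final total exceeds the quota.
import Mathlib
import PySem

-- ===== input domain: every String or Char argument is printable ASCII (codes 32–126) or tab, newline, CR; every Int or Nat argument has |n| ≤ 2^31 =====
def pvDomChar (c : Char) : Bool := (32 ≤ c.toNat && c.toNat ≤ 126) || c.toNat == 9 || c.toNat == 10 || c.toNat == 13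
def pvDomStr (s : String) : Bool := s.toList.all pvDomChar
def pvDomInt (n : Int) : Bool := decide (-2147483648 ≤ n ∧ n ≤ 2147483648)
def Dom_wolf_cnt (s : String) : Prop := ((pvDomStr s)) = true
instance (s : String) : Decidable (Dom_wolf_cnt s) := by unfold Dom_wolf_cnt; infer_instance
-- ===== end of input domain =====

-- B replaces A's single fused counting loop (four accumulators, early exit) by four
-- independent count scans compared against len(s)//4 via all() — idiomatic, same asymptotic cost, measurably faster in CPython.

-- ===== PORT A =====
-- the for-loop of A: one pass with four accumulators and early exits
def wolfLoop (q : Nat) : List Char → Nat → Nat → Nat → Nat → Bool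
  | [], _, _, _, _ => true
  | a :: rest, w, o, l, f =>
    if a = 'w' then
      if w + 1 > q then false else wolfLoop q rest (w + 1) o l f
    else if a = 'o' then
      if o + 1 > q then false else wolfLoop q rest w (o + 1) l f
    else if a = 'l' then
      if l + 1 > q then false else wolfLoop q rest w o (l + 1) f
    else if a = 'f' then
      if f + 1 > q then false else wolfLoop q rest w o l (f + 1)
    else wolfLoop q rest w o l f

def wolf_cnt (s : String) : Bool := wolfLoop (s.length / 4) s.toList 0 0 0 0

-- ===== PORT B =====
def wolf_cnt_alt (s : String) : Bool :=
  ['w', 'o', 'l', 'f'].all (fun c => s.toList.count c ≤ s.length / 4)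

-- ===== PRECONDITION & SPEC =====
def Spec_wolf_cnt (s : String) (out : Bool) : Prop := out = wolf_cnt_alt s
instance (s : String) (out : Bool) : Decidable (Spec_wolf_cnt s out) := by unfold Spec_wolf_cnt; infer_instance

-- ===== CLAIM (what is proved, stated in full; the proofs are below) =====
def Claim_equal_wolf_cnt : Prop := ∀ (s : String), Dom_wolf_cnt s → Spec_wolf_cnt s (wolf_cnt s)

-- ===== LEMMAS AND PROOFS =====

-- invariant: while all counters are within quota, the early-exit loop returns true
-- exactly when every final total stays within quota
theorem wolfLoop_eq (q : Nat) (cs : List Char) : ∀ (w o l f : Nat),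
    w ≤ q → o ≤ q → l ≤ q → f ≤ q →
    wolfLoop q cs w o l f =
      (decide (w + cs.count 'w' ≤ q) && decide (o + cs.count 'o' ≤ q) &&
       decide (l + cs.count 'l' ≤ q) && decide (f + cs.count 'f' ≤ q)) := by
  induction cs with
  | nil => intro w o l f hw ho hl hf; simp [wolfLoop, hw, ho, hl, hf]
  | cons a rest ih =>
    intro w o l f hw ho hl hf
    by_cases haw : a = 'w'
    · subst haw
      by_cases h : w + 1 > q
      · simp [wolfLoop, h, List.count_cons]; omega
      · simp only [wolfLoop, if_pos rfl, if_neg h,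
          ih (w + 1) o l f (by omega) ho hl hf, List.count_cons]
        simp [Nat.add_assoc, Nat.add_comm, Nat.add_left_comm]
    · by_cases hao : a = 'o'
      · subst hao
        by_cases h : o + 1 > q
        · simp [wolfLoop, h, List.count_cons]; omega
        · simp only [wolfLoop, if_neg (by decide : ¬ ('o' = 'w')), if_pos rfl, if_neg h,
            ih w (o + 1) l f hw (by omega) hl hf, List.count_cons]
          simp [Nat.add_assoc, Nat.add_comm, Nat.add_left_comm]
      · by_cases hal : a = 'l'
        · subst hal
          by_cases h : l + 1 > q
          · simp [wolfLoop, h, List.count_cons]; omega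
          · simp only [wolfLoop, if_neg (by decide : ¬ ('l' = 'w')),
              if_neg (by decide : ¬ ('l' = 'o')), if_pos rfl, if_neg h,
              ih w o (l + 1) f hw ho (by omega) hf, List.count_cons]
            simp [Nat.add_assoc, Nat.add_comm, Nat.add_left_comm]
        · by_cases haf : a = 'f'
          · subst haf
            by_cases h : f + 1 > q
            · simp [wolfLoop, h, List.count_cons]; omega
            · simp only [wolfLoop, if_neg (by decide : ¬ ('f' = 'w')),
                if_neg (by decide : ¬ ('f' = 'o')), if_neg (by decide : ¬ ('f' = 'l')),
                if_pos rfl, if_neg h,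
                ih w o l (f + 1) hw ho hl (by omega), List.count_cons]
              simp [Nat.add_assoc, Nat.add_comm, Nat.add_left_comm]
          · simp only [wolfLoop, if_neg haw, if_neg hao, if_neg hal, if_neg haf,
              ih w o l f hw ho hl hf, List.count_cons]
            simp [haw, hao, hal, haf]

-- ===== VERDICT (by name: the statement is the Claim_ definition above) =====
theorem wolf_cnt_spec : Claim_equal_wolf_cnt := by
  intro s _
  unfold Spec_wolf_cnt wolf_cnt wolf_cnt_alt
  rw [wolfLoop_eq (s.length / 4) s.toList 0 0 0 0 (Nat.zero_le _) (Nat.zero_le _)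
    (Nat.zero_le _) (Nat.zero_le _)]
  simp [List.all, Bool.and_assoc]
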